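-- pv_equiv track=rewrite | github.com/afanty2021/Memento-Skills | core/skill/execution/tool_context.py | _deduplicate_path_components
-- ===== SOURCE A (Python) =====
-- def _deduplicate_path_components(
--     root_parts: list[str], rel_parts: list[str]
-- ) -> list[str]:
--     """Deduplicate overlapping path components between root and relative path.
--
--     Compares path components from the end of root_parts with the beginning
--     of rel_parts to find and remove overlapping segments.
--     """
--     if not rel_parts:
--         return root_parts
--
--     # Special case: if the first rel component starts with a common prefix
--     # of the last root component and extends it (hallucinated segment), skip
--     # the first rel component.  E.g. root last='2517d7da', rel first='2517d7d7da'.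
--     # The overlap loop below handles exact-component matches; this handles
--     # partial/misaligned overlaps.
--     if root_parts and rel_parts:
--         last_root = root_parts[-1]
--         first_rel = rel_parts[0]
--         # Compute longest common prefix of last_root and first_rel
--         lcp_len = 0
--         for i in range(min(len(last_root), len(first_rel))):
--             if last_root[i] == first_rel[i]:
--                 lcp_len = i + 1
--             else:
--                 break
--         # If they share a non-trivial prefix (longer than 2 chars to avoid
--         # false positives) and first_rel is longer (extends rather than equals),
--         # skip the first_rel component to avoid duplicate segments.
--         if lcp_len > 2 and len(first_rel) > len(last_root) and first_rel[:lcp_len] == last_root[:lcp_len]: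
--             return root_parts + rel_parts[1:]
--
--     max_overlap = min(len(root_parts), len(rel_parts))
--     for overlap in range(max_overlap, 0, -1):
--         if root_parts[-overlap:] == rel_parts[:overlap]:
--             return root_parts + rel_parts[overlap:]
--
--     return root_parts + rel_parts
-- ===== SOURCE B (Python) =====
-- def _deduplicate_path_components(
--     root_parts: list[str], rel_parts: list[str]
-- ) -> list[str]:
--     """Same result as A. The 'hallucinated extension' special case is decided
--     by a direct 3-char prefix comparison (lcp > 2 holds iff the first three
--     characters agree), and the largest suffix/prefix overlap is found with the
--     KMP prefix function over rel_parts + [sentinel] + root_parts in O(n+m)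
--     instead of A's quadratic descending slice comparisons."""
--     if not rel_parts:
--         return root_parts
--     if root_parts:
--         last, first = root_parts[-1], rel_parts[0]
--         if len(first) > len(last) >= 3 and first[:3] == last[:3]:
--             return root_parts + rel_parts[1:]
--     sentinel = object()  # never equal to any str component
--     s = rel_parts + [sentinel] + root_parts
--     pi = [0] * len(s)
--     k = 0
--     for i in range(1, len(s)):
--         while k and s[i] != s[k]:
--             k = pi[k - 1]
--         if s[i] == s[k]:
--             k += 1
--         pi[i] = k
--     return root_parts + rel_parts[k:]
-- ===== Notes on version B (the rewrite author's own statement) =====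
-- stated objective: faster
-- what changed: The descending brute-force scan over overlap sizes with double slicing (root[-k:] == rel[:k]) is replaced by one KMP prefix-function pass over rel_parts + [sentinel] + root_parts whose final value is the largest overlap, and the character-by-character lcp loop of the special case is replaced by a direct 3-character prefix comparison (lcp > 2 iff the first three characters agree).
import Mathlib
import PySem

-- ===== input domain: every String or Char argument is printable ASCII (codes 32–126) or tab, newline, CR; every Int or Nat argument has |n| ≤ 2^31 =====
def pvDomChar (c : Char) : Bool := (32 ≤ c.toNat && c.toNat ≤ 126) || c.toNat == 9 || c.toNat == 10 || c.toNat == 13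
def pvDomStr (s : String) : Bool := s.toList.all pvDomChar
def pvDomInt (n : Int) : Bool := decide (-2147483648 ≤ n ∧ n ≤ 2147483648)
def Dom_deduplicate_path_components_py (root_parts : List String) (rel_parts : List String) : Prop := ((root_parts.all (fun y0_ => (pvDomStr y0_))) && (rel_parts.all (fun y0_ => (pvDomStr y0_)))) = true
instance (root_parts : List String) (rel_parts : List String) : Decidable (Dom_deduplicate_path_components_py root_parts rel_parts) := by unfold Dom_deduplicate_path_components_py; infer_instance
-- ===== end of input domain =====

-- B replaces A's quadratic descending scan over overlap sizes (double slicing root[-k:] == rel[:k])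
-- by a single KMP prefix-function pass over rel_parts + [sentinel] + root_parts, and A's lcp
-- counting loop by a direct 3-character prefix comparison; objective: faster (asymptotic).

-- ===== PORT A =====
-- A's `for i in range(min(len(last_root), len(first_rel)))` with `lcp_len = i + 1` / `break`
def pvLcpA (last first : String) : List Int → Int → Int
  | [], lcp => lcp
  | i :: rest, lcp =>
    match PySem.Str.pyGet? last i, PySem.Str.pyGet? first i with
    | some a, some b => if a = b then pvLcpA last first rest (i + 1) else lcp
    | _, _ => lcp  -- unreachable: i ranges below both lengths

-- A's `for overlap in range(max_overlap, 0, -1)` with early return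
def pvOverlapA (root rel : List String) : List Int → List String
  | [] => root ++ rel
  | k :: rest =>
    if PySem.List.slice root (some (-k)) none = PySem.List.slice rel none (some k)
    then root ++ PySem.List.slice rel (some k) none
    else pvOverlapA root rel rest

def deduplicate_path_components_py (root_parts : List String) (rel_parts : List String) : List String :=
  if rel_parts.isEmpty then root_parts
  else
    let special : Option (List String) :=
      if root_parts.isEmpty = false ∧ rel_parts.isEmpty = false then
        let last_root := PySem.List.pyGetD root_parts (-1) ""
        let first_rel := PySem.List.pyGetD rel_parts 0 ""
        let lcp_len := pvLcpA last_root first_rel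
          (PySem.List.pyRange 0 (min (PySem.Str.len last_root) (PySem.Str.len first_rel)) 1) 0
        if 2 < lcp_len ∧ PySem.Str.len last_root < PySem.Str.len first_rel ∧
            PySem.Str.slice first_rel none (some lcp_len) = PySem.Str.slice last_root none (some lcp_len)
        then some (root_parts ++ PySem.List.slice rel_parts (some 1) none)
        else none
      else none
    match special with
    | some r => r
    | none =>
      let max_overlap := min ((root_parts.length : Int)) ((rel_parts.length : Int))
      pvOverlapA root_parts rel_parts (PySem.List.pyRange max_overlap 0 (-1))

-- ===== PORT B =====
-- B's `while k and s[i] != s[k]: k = pi[k - 1]` (fuel = the entry value of k, which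
-- strictly decreases each iteration, so the fuel is only a totality guard)
def pvFall (s : List (Option String)) (pi : List Nat) (x : Option String) : Nat → Nat → Nat
  | 0, k => k
  | fuel + 1, k =>
    if k ≠ 0 ∧ x ≠ s.getD k none then pvFall s pi x fuel (pi.getD (k - 1) 0) else k

-- B's loop body: fall back, extend on a match, store pi[i] = k
def pvKmpStep (s : List (Option String)) (st : List Nat × Nat) (i : Nat) : List Nat × Nat :=
  let k1 := pvFall s st.1 (s.getD i none) st.2 st.2
  let k2 := if s.getD i none = s.getD k1 none then k1 + 1 else k1
  (st.1.set i k2, k2)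

def deduplicate_path_components_py_alt (root_parts : List String) (rel_parts : List String) : List String :=
  if rel_parts.isEmpty then root_parts
  else if root_parts.isEmpty = false ∧
      (let last := PySem.List.pyGetD root_parts (-1) ""
       let first := PySem.List.pyGetD rel_parts 0 ""
       PySem.Str.len last < PySem.Str.len first ∧ 3 ≤ PySem.Str.len last ∧
       PySem.Str.slice first none (some 3) = PySem.Str.slice last none (some 3))
  then root_parts ++ PySem.List.slice rel_parts (some 1) none
  else
    -- s = rel_parts + [sentinel] + root_parts; the sentinel (Python object()) is `none`
    let s : List (Option String) := rel_parts.map some ++ [none] ++ root_parts.map some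
    let res := (List.range' 1 (s.length - 1)).foldl (pvKmpStep s) (List.replicate s.length 0, 0)
    root_parts ++ PySem.List.slice rel_parts (some ((res.2 : Nat) : Int)) none

-- ===== PRECONDITION & SPEC =====
def Spec_deduplicate_path_components_py (root_parts : List String) (rel_parts : List String) (out : List String) : Prop := out = deduplicate_path_components_py_alt root_parts rel_parts
instance (root_parts : List String) (rel_parts : List String) (out : List String) : Decidable (Spec_deduplicate_path_components_py root_parts rel_parts out) := by unfold Spec_deduplicate_path_components_py; infer_instance

-- ===== CLAIM (what is proved, stated in full; the proofs are below) =====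
def Claim_equal_deduplicate_path_components_py : Prop := ∀ (root_parts : List String) (rel_parts : List String), Dom_deduplicate_path_components_py root_parts rel_parts → Spec_deduplicate_path_components_py root_parts rel_parts (deduplicate_path_components_py root_parts rel_parts)

-- ===== LEMMAS AND PROOFS =====

/-- Proof-side common-prefix length of two char lists. -/
def pvCpl : List Char → List Char → Nat
  | a :: as, b :: bs => if a = b then pvCpl as bs + 1 else 0
  | _, _ => 0

theorem pvCpl_take : ∀ (L F : List Char), L.take (pvCpl L F) = F.take (pvCpl L F) := by
  intro L
  induction L with
  | nil => intro F; cases F <;> simp [pvCpl]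
  | cons a as ih =>
    intro F
    cases F with
    | nil => simp [pvCpl]
    | cons b bs =>
      by_cases h : a = b
      · simp [pvCpl, h, ih bs]
      · simp [pvCpl, h]

theorem pvCpl_eq_of_mismatch : ∀ (k : Nat) (L F : List Char), L.take k = F.take k →
    ∀ (hL : k < L.length) (hF : k < F.length), L[k]'hL ≠ F[k]'hF → pvCpl L F = k := by
  intro k
  induction k with
  | zero =>
    intro L F _ hL hF hne
    cases L with
    | nil => simp at hL
    | cons a as =>
      cases F with
      | nil => simp at hF
      | cons b bs =>
        simp at hne
        simp [pvCpl, hne]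
  | succ k ih =>
    intro L F htake hL hF hne
    cases L with
    | nil => simp at hL
    | cons a as =>
      cases F with
      | nil => simp at hF
      | cons b bs =>
        simp at htake
        simp [pvCpl, htake.1]
        exact ih as bs htake.2 (by simpa using hL) (by simpa using hF) (by simpa using hne)

theorem pvCpl_eq_of_take_all : ∀ (k : Nat) (L F : List Char), L.take k = F.take k →
    k = min L.length F.length → pvCpl L F = k := by
  intro k
  induction k with
  | zero =>
    intro L F _ hmin
    cases L with
    | nil => simp [pvCpl]
    | cons a as =>
      cases F with
      | nil => simp [pvCpl]
      | cons b bs => simp at hmin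
  | succ k ih =>
    intro L F htake hmin
    cases L with
    | nil => simp at hmin
    | cons a as =>
      cases F with
      | nil => simp at hmin
      | cons b bs =>
        simp at htake hmin
        simp [pvCpl, htake.1]
        exact ih as bs htake.2 (by omega)

/-- `n ≤ pvCpl L F` iff the first `n` characters exist and agree. -/
theorem pvCpl_ge_iff : ∀ (n : Nat) (L F : List Char),
    n ≤ pvCpl L F ↔ n ≤ L.length ∧ n ≤ F.length ∧ L.take n = F.take n := by
  intro n
  induction n with
  | zero => intro L F; simp
  | succ n ih =>
    intro L F
    cases L with
    | nil => simp [pvCpl]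
    | cons a as =>
      cases F with
      | nil => simp [pvCpl]
      | cons b bs =>
        by_cases h : a = b
        · simp [pvCpl, h, ih as bs]
        · simp [pvCpl, h]

/-- A's lcp loop computes the common prefix length. -/
theorem pvLcpA_go (last first : String) (k : Nat)
    (hk : k ≤ min last.toList.length first.toList.length)
    (htake : last.toList.take k = first.toList.take k) :
    pvLcpA last first
      (PySem.List.pyRange (k : Int) ((min last.toList.length first.toList.length : Nat) : Int) 1) (k : Int)
      = (pvCpl last.toList first.toList : Int) := by
  set m := min last.toList.length first.toList.length with hm
  obtain ⟨n, hn⟩ : ∃ n, m - k = n := ⟨m - k, rfl⟩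
  induction n generalizing k with
  | zero =>
    have hkm : k = m := by omega
    rw [PySem.List.pyRange_one_eq_nil (by exact_mod_cast le_of_eq hkm.symm)]
    have hcv : pvCpl last.toList first.toList = k :=
      pvCpl_eq_of_take_all k last.toList first.toList htake (by omega)
    simp [pvLcpA, hcv]
  | succ n ih =>
    have hklt : k < m := by omega
    rw [PySem.List.pyRange_one_cons (by exact_mod_cast hklt)]
    have hL : k < last.toList.length := by omega
    have hF : k < first.toList.length := by omega
    simp only [pvLcpA, PySem.Str.pyGet?_natCast, List.getElem?_eq_getElem hL,
      List.getElem?_eq_getElem hF]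
    by_cases heq : last.toList[k] = first.toList[k]
    · simp only [heq]
      have htake' : last.toList.take (k + 1) = first.toList.take (k + 1) := by
        rw [List.take_add_one, List.take_add_one, htake,
          List.getElem?_eq_getElem hL, List.getElem?_eq_getElem hF, heq]
      have := ih (k + 1) htake' (by omega) (by omega)
      simpa using this
    · simp only [if_neg heq]
      exact_mod_cast (pvCpl_eq_of_mismatch k last.toList first.toList htake hL hF heq).symm

/-- The string-slice equality in A's special-case test always holds at the lcp. -/
theorem pvSliceLcp (last first : String) :
    PySem.Str.slice first none (some ((pvCpl last.toList first.toList : Nat) : Int))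
      = PySem.Str.slice last none (some ((pvCpl last.toList first.toList : Nat) : Int)) := by
  apply String.toList_inj.mp
  simp [PySem.Str.slice]
  exact (pvCpl_take last.toList first.toList).symm

/-- A's descending overlap loop returns the greatest matching overlap. -/
theorem pvOvA_eq (root rel : List String) :
    ∀ m : Nat, m ≤ root.length → m ≤ rel.length →
      pvOverlapA root rel (PySem.List.pyRange (m : Int) 0 (-1))
        = root ++ rel.drop (Nat.findGreatest
            (fun k => root.drop (root.length - k) = rel.take k) m) := by
  intro m
  induction m with
  | zero =>
    intro _ _
    rw [PySem.List.pyRange_neg_one_eq_nil (by norm_num)]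
    simp [pvOverlapA]
  | succ m ih =>
    intro h1 h2
    rw [PySem.List.pyRange_neg_one_cons (by exact_mod_cast Nat.succ_pos m)]
    simp only [pvOverlapA]
    rw [PySem.List.slice_from_neg_natCast root (m + 1) (Nat.succ_pos m),
      PySem.List.slice_to_natCast, Nat.findGreatest_succ]
    by_cases h : root.drop (root.length - (m + 1)) = rel.take (m + 1)
    · rw [if_pos h, if_pos h, PySem.List.slice_from_natCast]
    · rw [if_neg h, if_neg h]
      have hcast : ((m + 1 : Nat) : Int) - 1 = ((m : Nat) : Int) := by push_cast; ring
      rw [hcast]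
      exact ih (by omega) (by omega)

/-- `k` is a proper border of the length-`i` prefix of `s`. -/
abbrev pvP (s : List (Option String)) (i k : Nat) : Prop :=
  k < i ∧ s.take k = (s.take i).drop (i - k)

/-- Longest proper border length of the length-`i` prefix of `s` (the prefix function). -/
def pvBeta (s : List (Option String)) (i : Nat) : Nat := Nat.findGreatest (pvP s i) i

theorem pvP_zero (s : List (Option String)) {i : Nat} (hi : 0 < i) : pvP s i 0 :=
  ⟨hi, by simp⟩

theorem pvBeta_spec (s : List (Option String)) {i : Nat} (hi : 0 < i) :
    pvP s i (pvBeta s i) :=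
  Nat.findGreatest_spec (Nat.zero_le i) (pvP_zero s hi)

theorem pvBeta_le_of {s : List (Option String)} {i k : Nat} (h : pvP s i k) :
    k ≤ pvBeta s i :=
  Nat.le_findGreatest (le_of_lt h.1) h

theorem pvP_trans_down {s : List (Option String)} {i k j : Nat}
    (hk : pvP s i k) (hj : pvP s i j) (hjk : j < k) : pvP s k j := by
  refine ⟨hjk, ?_⟩
  rw [hk.2, List.drop_drop]
  have harith : i - k + (k - j) = i - j := by omega
  rw [harith, ← hj.2]

theorem pvP_trans_up {s : List (Option String)} {i k j : Nat}
    (hk : pvP s i k) (hj : pvP s k j) : pvP s i j := by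
  refine ⟨lt_trans hj.1 hk.1, ?_⟩
  rw [hj.2, hk.2, List.drop_drop]
  have harith : i - k + (k - j) = i - j := by omega
  rw [harith]

theorem pvP_succ_iff {s : List (Option String)} {i k : Nat} (hi : i < s.length) :
    pvP s (i + 1) (k + 1) ↔ pvP s i k ∧ s.getD k none = s.getD i none := by
  constructor
  · rintro ⟨hlt, he⟩
    have hk : k < i := by omega
    have hkl : k < s.length := lt_trans hk hi
    have harith : i + 1 - (k + 1) = i - k := by omega
    rw [harith, List.take_add_one, List.take_add_one,
      List.getElem?_eq_getElem hkl, List.getElem?_eq_getElem hi,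
      List.drop_append_of_le_length (by simp; omega)] at he
    have := List.append_inj' he (by simp)
    refine ⟨⟨hk, this.1⟩, ?_⟩
    rw [List.getD_eq_getElem s none hkl, List.getD_eq_getElem s none hi]
    simpa using this.2
  · rintro ⟨⟨hk, he⟩, hg⟩
    have hkl : k < s.length := lt_trans hk hi
    refine ⟨by omega, ?_⟩
    have harith : i + 1 - (k + 1) = i - k := by omega
    rw [harith, List.take_add_one, List.take_add_one,
      List.getElem?_eq_getElem hkl, List.getElem?_eq_getElem hi,
      List.drop_append_of_le_length (by simp; omega), ← he]
    rw [List.getD_eq_getElem s none hkl, List.getD_eq_getElem s none hi] at hg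
    simp [hg]

theorem pvFall_spec (s : List (Option String)) (pi : List Nat) (x : Option String) (i : Nat)
    (hpi : ∀ j, j < i → pi.getD j 0 = pvBeta s (j + 1)) :
    ∀ fuel k, k ≤ fuel → pvP s i k →
      pvP s i (pvFall s pi x fuel k) ∧
      (pvFall s pi x fuel k = 0 ∨ x = s.getD (pvFall s pi x fuel k) none) ∧
      (∀ j, pvP s i j → j ≤ k → x = s.getD j none → j ≤ pvFall s pi x fuel k) := by
  intro fuel
  induction fuel with
  | zero =>
    intro k hk hPk
    have hk0 : k = 0 := by omega
    subst hk0
    exact ⟨hPk, Or.inl rfl, fun j _ hj _ => by omega⟩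
  | succ fuel ih =>
    intro k hk hPk
    by_cases hc : k ≠ 0 ∧ x ≠ s.getD k none
    · have hkpos : 0 < k := Nat.pos_of_ne_zero hc.1
      have hki : k < i := hPk.1
      have hpik : pi.getD (k - 1) 0 = pvBeta s k := by
        have := hpi (k - 1) (by omega)
        rwa [Nat.sub_add_cancel hkpos] at this
      have hPbk : pvP s k (pvBeta s k) := pvBeta_spec s hkpos
      have hPk' : pvP s i (pvBeta s k) := pvP_trans_up hPk hPbk
      have hble : pvBeta s k ≤ fuel := by
        have := hPbk.1
        omega
      have hrw : pvFall s pi x (fuel + 1) k = pvFall s pi x fuel (pi.getD (k - 1) 0) := by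
        simp only [pvFall, if_pos hc]
      rw [hrw, hpik]
      obtain ⟨ha, hb, hcc⟩ := ih (pvBeta s k) hble hPk'
      refine ⟨ha, hb, fun j hPj hjk hxj => ?_⟩
      have hjk' : j < k := by
        rcases Nat.lt_or_ge j k with h | h
        · exact h
        · exfalso
          have : j = k := by omega
          subst this
          exact hc.2 hxj
      exact hcc j hPj (le_trans (pvBeta_le_of (pvP_trans_down hPk hPj hjk')) (le_refl _)) hxj
    · have hrw : pvFall s pi x (fuel + 1) k = k := by
        simp only [pvFall, if_neg hc]
      rw [hrw]
      refine ⟨hPk, ?_, fun j _ hj _ => hj⟩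
      by_cases hk0 : k = 0
      · exact Or.inl hk0
      · refine Or.inr ?_
        by_contra hxx
        exact hc ⟨hk0, hxx⟩

theorem pvKmpStep_spec (s : List (Option String)) (i : Nat) (hi1 : 1 ≤ i) (hi : i < s.length)
    (pi : List Nat) (hpi : ∀ j, j < i → pi.getD j 0 = pvBeta s (j + 1)) :
    pvKmpStep s (pi, pvBeta s i) i = (pi.set i (pvBeta s (i + 1)), pvBeta s (i + 1)) := by
  have hi0 : 0 < i := hi1
  obtain ⟨ha, hb, hc⟩ := pvFall_spec s pi (s.getD i none) i hpi (pvBeta s i) (pvBeta s i)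
    (le_refl _) (pvBeta_spec s hi0)
  set x := s.getD i none with hx
  set k1 := pvFall s pi x (pvBeta s i) (pvBeta s i) with hk1
  have hgoal : (if x = s.getD k1 none then k1 + 1 else k1) = pvBeta s (i + 1) := by
    by_cases hm : x = s.getD k1 none
    · rw [if_pos hm]
      have hP1 : pvP s (i + 1) (k1 + 1) := (pvP_succ_iff hi).mpr ⟨ha, hm.symm⟩
      apply le_antisymm
      · exact pvBeta_le_of hP1
      · have hPb : pvP s (i + 1) (pvBeta s (i + 1)) := pvBeta_spec s (by omega)
        rcases Nat.eq_zero_or_pos (pvBeta s (i + 1)) with h0 | hpos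
        · omega
        · obtain ⟨j, hj⟩ : ∃ j, pvBeta s (i + 1) = j + 1 := ⟨pvBeta s (i + 1) - 1, by omega⟩
          rw [hj] at hPb
          obtain ⟨hPj, hgj⟩ := (pvP_succ_iff hi).mp hPb
          have := hc j hPj (pvBeta_le_of hPj) hgj.symm
          omega
    · rw [if_neg hm]
      have hk10 : k1 = 0 := by
        rcases hb with h | h
        · exact h
        · exact absurd h hm
      rw [hk10]
      symm
      rw [pvBeta, Nat.findGreatest_eq_zero_iff]
      intro m hm0 hmle hPm
      obtain ⟨j, hj⟩ : ∃ j, m = j + 1 := ⟨m - 1, by omega⟩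
      subst hj
      obtain ⟨hPj, hgj⟩ := (pvP_succ_iff hi).mp hPm
      have hj0 : j ≤ 0 := by
        have := hc j hPj (pvBeta_le_of hPj) hgj.symm
        omega
      have hj0' : j = 0 := by omega
      subst hj0'
      rw [← hk10] at hgj
      exact hm hgj.symm
  simp only [pvKmpStep, ← hx, ← hk1, hgoal]

theorem pvBeta_one (s : List (Option String)) : pvBeta s 1 = 0 := by
  rw [pvBeta, Nat.findGreatest_eq_zero_iff]
  intro m hm hm1 hP
  have := hP.1
  omega

theorem pvKmpFold (s : List (Option String)) :
    ∀ m : Nat, m + 1 ≤ s.length →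
      ∃ pi : List Nat,
        (List.range' 1 m).foldl (pvKmpStep s) (List.replicate s.length 0, 0)
          = (pi, pvBeta s (m + 1)) ∧
        pi.length = s.length ∧ (∀ j, j ≤ m → pi.getD j 0 = pvBeta s (j + 1)) := by
  intro m
  induction m with
  | zero =>
    intro hlen
    refine ⟨List.replicate s.length 0, ?_, by simp, ?_⟩
    · simp [pvBeta_one]
    · intro j hj
      have hj0 : j = 0 := by omega
      subst hj0
      rw [pvBeta_one]
      simp [List.getD]
  | succ m ih =>
    intro hlen
    obtain ⟨pi, hfold, hplen, hpprop⟩ := ih (by omega)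
    have hrange : List.range' 1 (m + 1) = List.range' 1 m ++ [1 + m] := by
      simp [List.range'_concat]
    have hstep := pvKmpStep_spec s (1 + m) (by omega) (by omega) pi
      (fun j hj => hpprop j (by omega))
    refine ⟨pi.set (1 + m) (pvBeta s (1 + m + 1)), ?_, by simp [hplen], ?_⟩
    · rw [hrange, List.foldl_append, hfold]
      simp only [List.foldl_cons, List.foldl_nil]
      have h1m : 1 + m = m + 1 := by omega
      rw [h1m] at hstep ⊢
      rw [hstep]
    · intro j hj
      by_cases hje : j = 1 + m
      · subst hje
        rw [List.getD_eq_getElem _ 0 (by simp [hplen]; omega)]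
        simp only [List.getElem_set_self]
      · have : (pi.set (1 + m) (pvBeta s (1 + m + 1))).getD j 0 = pi.getD j 0 := by
          simp [List.getD, List.getElem?_set_ne (by omega : 1 + m ≠ j)]
        rw [this]
        exact hpprop j (by omega)

theorem pvS_sent (root rel : List String) :
    (rel.map some ++ [none] ++ root.map some)[rel.length]? = some none := by
  rw [List.getElem?_append_left (by simp : rel.length < (rel.map some ++ [none]).length),
    List.getElem?_append_right (by simp : (rel.map some).length ≤ rel.length)]
  simp

theorem pvS_some (root rel : List String) {j : Nat}
    (hjn : j < rel.length + 1 + root.length) (hne : j ≠ rel.length) :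
    ∃ v, (rel.map some ++ [none] ++ root.map some)[j]? = some (some v) := by
  rcases Nat.lt_or_ge j rel.length with h | h
  · refine ⟨rel[j]'h, ?_⟩
    rw [List.getElem?_append_left (by simp; omega : j < (rel.map some ++ [none]).length),
      List.getElem?_append_left (by simp [h] : j < (rel.map some).length)]
    simp [h]
  · have hgt : rel.length < j := by omega
    refine ⟨root[j - rel.length - 1]'(by omega), ?_⟩
    rw [List.getElem?_append_right (by simp; omega : (rel.map some ++ [none]).length ≤ j)]
    have hlt : j - (rel.map some ++ [none]).length < (root.map some).length := by simp; omega
    rw [List.getElem?_eq_getElem hlt]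
    simp
    congr 1

theorem pvS_take (root rel : List String) {k : Nat} (hk : k ≤ rel.length) :
    (rel.map some ++ [none] ++ root.map some).take k = (rel.take k).map some := by
  rw [List.append_assoc, List.take_append_of_le_length (by simp [hk]), List.map_take]

theorem pvS_drop (root rel : List String) {k : Nat} (hk : k ≤ root.length) :
    (rel.map some ++ [none] ++ root.map some).drop (rel.length + 1 + root.length - k)
      = (root.drop (root.length - k)).map some := by
  have harith : rel.length + 1 + root.length - k
      = (rel.map some ++ [none]).length + (root.length - k) := by simp; omega
  rw [harith, ← List.drop_drop, List.drop_left, List.map_drop]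

theorem pvP_full_iff (root rel : List String) (k : Nat) :
    pvP (rel.map some ++ [none] ++ root.map some) (rel.length + 1 + root.length) k
      ↔ k ≤ root.length ∧ k ≤ rel.length ∧ root.drop (root.length - k) = rel.take k := by
  have hN : (rel.map some ++ [none] ++ root.map some).length
      = rel.length + 1 + root.length := by simp; omega
  set s := rel.map some ++ [none] ++ root.map some with hs
  set L := rel.length with hL
  set R := root.length with hR
  set N := L + 1 + R with hNN
  have htakeN : s.take N = s := List.take_of_length_le (by omega)
  constructor
  · rintro ⟨hlt, he⟩
    rw [htakeN] at he
    have hkL : k ≤ L := by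
      by_contra hgt
      have hgt' : L < k := by omega
      have h1 : (s.take k)[L]? = s[L]? := by
        rw [List.getElem?_take]
        simp [hgt']
      have h2 : (s.drop (N - k))[L]? = s[N - k + L]? := List.getElem?_drop ..
      obtain ⟨v, hv⟩ := pvS_some root rel (show N - k + L < rel.length + 1 + root.length by omega)
        (show N - k + L ≠ rel.length by omega)
      rw [he, h2, hv] at h1
      rw [pvS_sent root rel] at h1
      simp at h1
    have hkR : k ≤ R := by
      by_contra hgt
      have hgt' : R < k := by omega
      have h1 : (s.take k)[k - R - 1]? = s[k - R - 1]? := by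
        rw [List.getElem?_take]
        simp [show k - R - 1 < k by omega]
      have h2 : (s.drop (N - k))[k - R - 1]? = s[N - k + (k - R - 1)]? := List.getElem?_drop ..
      have hidx : N - k + (k - R - 1) = L := by omega
      obtain ⟨v, hv⟩ := pvS_some root rel (show k - R - 1 < rel.length + 1 + root.length by omega)
        (show k - R - 1 ≠ rel.length by omega)
      rw [he, h2, hidx, pvS_sent root rel] at h1
      rw [hv] at h1
      simp at h1
    refine ⟨hkR, hkL, ?_⟩
    rw [pvS_take root rel hkL, pvS_drop root rel hkR] at he
    exact ((List.map_inj_right (Option.some_injective _)).mp he).symm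
  · rintro ⟨hkR, hkL, heq⟩
    refine ⟨by omega, ?_⟩
    rw [htakeN, pvS_take root rel hkL, pvS_drop root rel hkR, heq]

theorem pvBeta_full (root rel : List String) :
    pvBeta (rel.map some ++ [none] ++ root.map some) (rel.length + 1 + root.length)
      = Nat.findGreatest (fun k => root.drop (root.length - k) = rel.take k)
          (min root.length rel.length) := by
  have hQ0 : root.drop (root.length - 0) = rel.take 0 := by simp
  apply le_antisymm
  · have hb := pvBeta_spec (rel.map some ++ [none] ++ root.map some)
      (show 0 < rel.length + 1 + root.length by omega)
    obtain ⟨h1, h2, h3⟩ := (pvP_full_iff root rel _).mp hb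
    exact Nat.le_findGreatest (by omega) h3
  · have hg1 := Nat.findGreatest_spec (P := fun k => root.drop (root.length - k) = rel.take k)
      (Nat.zero_le (min root.length rel.length)) hQ0
    have hg2 := Nat.findGreatest_le (P := fun k => root.drop (root.length - k) = rel.take k)
      (n := min root.length rel.length)
    exact pvBeta_le_of ((pvP_full_iff root rel _).mpr ⟨by omega, by omega, hg1⟩)

-- ===== VERDICT (by name: the statement is the Claim_ definition above) =====
theorem deduplicate_path_components_py_spec : Claim_equal_deduplicate_path_components_py := by
  intro root rel _
  unfold Spec_deduplicate_path_components_py deduplicate_path_components_py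
    deduplicate_path_components_py_alt
  by_cases hrel : rel.isEmpty
  · simp [hrel]
  · simp only [if_neg hrel]
    have hrelne : rel ≠ [] := by simpa [List.isEmpty_iff] using hrel
    have hrellen : 0 < rel.length := List.length_pos_iff.mpr hrelne
    set last := PySem.List.pyGetD root (-1) "" with hlast
    set first := PySem.List.pyGetD rel 0 "" with hfirst
    set c := pvCpl last.toList first.toList with hc
    have hlcpA : pvLcpA last first
        (PySem.List.pyRange 0 (min (PySem.Str.len last) (PySem.Str.len first)) 1) 0 = (c : Int) := by
      have hmin : min (PySem.Str.len last) (PySem.Str.len first)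
          = ((min last.toList.length first.toList.length : Nat) : Int) := by
        simp [PySem.Str.len_eq]
      rw [hmin]
      have := pvLcpA_go last first 0 (by omega) (by simp)
      simpa using this
    have hslice := pvSliceLcp last first
    rw [← hc] at hslice
    -- B's 3-character test equals A's lcp test
    have h3f : (PySem.Str.slice first none (some 3)).toList = first.toList.take 3 := by
      simp [PySem.Str.slice, PySem.List.slice]
    have h3l : (PySem.Str.slice last none (some 3)).toList = last.toList.take 3 := by
      simp [PySem.Str.slice, PySem.List.slice]
    have hcond : (2 < c ∧ last.length < first.length) ↔
        (last.length < first.length ∧ 3 ≤ last.length ∧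
          PySem.Str.slice first none (some 3) = PySem.Str.slice last none (some 3)) := by
      have hlen1 : last.length = last.toList.length := (String.length_toList).symm
      have hlen2 : first.length = first.toList.length := (String.length_toList).symm
      constructor
      · rintro ⟨hcc, hlt⟩
        have h3 : 3 ≤ c := by omega
        obtain ⟨hA, hB, hT⟩ := (pvCpl_ge_iff 3 last.toList first.toList).mp (hc ▸ h3)
        refine ⟨hlt, by omega, ?_⟩
        rw [← String.toList_inj, h3f, h3l, hT]
      · rintro ⟨hlt, hll, heq⟩
        have hT : last.toList.take 3 = first.toList.take 3 := by
          rw [← h3f, ← h3l, heq]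
        have h3 : 3 ≤ c := by
          rw [hc]
          exact (pvCpl_ge_iff 3 last.toList first.toList).mpr ⟨by omega, by omega, hT⟩
        exact ⟨by omega, hlt⟩
    -- the two overlap computations agree (A's descending scan = B's KMP pass)
    have hmain : pvOverlapA root rel
          (PySem.List.pyRange (min ((root.length : Int)) ((rel.length : Int))) 0 (-1))
        = root ++ PySem.List.slice rel
            (some (((((List.range' 1 ((rel.map some ++ [none] ++ root.map some).length - 1)).foldl
              (pvKmpStep (rel.map some ++ [none] ++ root.map some))
              (List.replicate (rel.map some ++ [none] ++ root.map some).length 0, 0)).2 : Nat) : Int))) none := by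
      have hslen : (rel.map some ++ [none] ++ root.map some).length
          = rel.length + 1 + root.length := by simp; omega
      obtain ⟨pi, hfold, _, _⟩ := pvKmpFold (rel.map some ++ [none] ++ root.map some)
        ((rel.map some ++ [none] ++ root.map some).length - 1) (by omega)
      rw [hfold]
      have hN1 : (rel.map some ++ [none] ++ root.map some).length - 1 + 1
          = rel.length + 1 + root.length := by omega
      rw [hN1, pvBeta_full root rel]
      have hmincast : min ((root.length : Int)) ((rel.length : Int))
          = ((min root.length rel.length : Nat) : Int) := by
        rw [Nat.cast_min]
      rw [hmincast, pvOvA_eq root rel (min root.length rel.length)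
        (Nat.min_le_left _ _) (Nat.min_le_right _ _), PySem.List.slice_from_natCast]
    by_cases hroot : root.isEmpty
    · -- root empty: special case off on both sides
      have hcneg : ¬ (root.isEmpty = false ∧ rel.isEmpty = false) := by simp [hroot]
      have hcnegB : ¬ (root.isEmpty = false ∧
          (PySem.Str.len last < PySem.Str.len first ∧ 3 ≤ PySem.Str.len last ∧
            PySem.Str.slice first none (some 3) = PySem.Str.slice last none (some 3))) := by
        simp [hroot]
      simp only [if_neg hcneg, if_neg hcnegB]
      simpa [hrelne] using hmain
    · have hroot' : root.isEmpty = false := by simpa using hroot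
      have hApre : root.isEmpty = false ∧ rel.isEmpty = false :=
        ⟨hroot', by simpa using hrel⟩
      by_cases hsp : 2 < c ∧ last.length < first.length
      · -- special case fires on both sides
        obtain ⟨hlt3, h3len, heq3⟩ := hcond.mp hsp
        have hAcond : 2 < (c : Int) ∧
            PySem.Str.len last < PySem.Str.len first ∧
            PySem.Str.slice first none (some ((c : Nat) : Int))
              = PySem.Str.slice last none (some ((c : Nat) : Int)) := by
          refine ⟨by exact_mod_cast hsp.1, ?_, hslice⟩
          simp only [PySem.Str.len_eq]
          exact_mod_cast hsp.2
        have hBcond : root.isEmpty = false ∧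
            (PySem.Str.len last < PySem.Str.len first ∧ 3 ≤ PySem.Str.len last ∧
              PySem.Str.slice first none (some 3) = PySem.Str.slice last none (some 3)) := by
          refine ⟨hroot', ?_, ?_, heq3⟩
          · simp only [PySem.Str.len_eq]
            exact_mod_cast hlt3
          · simp only [PySem.Str.len_eq]
            exact_mod_cast h3len
        simp only [if_pos hApre, hlcpA, if_pos hAcond, if_pos hBcond]
      · -- special case off on both sides
        have hAN : ¬ (2 < (c : Int) ∧
            PySem.Str.len last < PySem.Str.len first ∧
            PySem.Str.slice first none (some ((c : Nat) : Int))
              = PySem.Str.slice last none (some ((c : Nat) : Int))) := by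
          intro h
          apply hsp
          refine ⟨by exact_mod_cast h.1, ?_⟩
          have := h.2.1
          simp only [PySem.Str.len_eq] at this
          exact_mod_cast this
        have hBN : ¬ (root.isEmpty = false ∧
            (PySem.Str.len last < PySem.Str.len first ∧ 3 ≤ PySem.Str.len last ∧
              PySem.Str.slice first none (some 3) = PySem.Str.slice last none (some 3))) := by
          rintro ⟨-, hlt, hll, heq⟩
          apply hsp
          apply hcond.mpr
          refine ⟨?_, ?_, heq⟩
          · simp only [PySem.Str.len_eq] at hlt
            exact_mod_cast hlt
          · simp only [PySem.Str.len_eq] at hll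
            exact_mod_cast hll
        simp only [if_pos hApre, hlcpA, if_neg hAN, if_neg hBN]
        simpa [hrelne] using hmain
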